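-- pv_equiv track=rewrite | github.com/KShih/workspaceLeetcode | python/Google_CompareString.py | better_compare_string
-- ===== SOURCE A (Python) =====
-- def better_compare_string(A, B):
--     A, B = A.split(","), B.split(",")
--     freq_count_of_A, cache = [0] * 11, [0] * 11   # count of freq 1~10, cache for sum of first i value in freq array
--     ret = []
--
--     for str in A:
--         min_freq = str.count(min(str))
--         freq_count_of_A[min_freq] += 1
--
--     for str in B:
--         min_freq = str.count(min(str))
--         if cache[min_freq] == 0:
--             sum_f = sum(freq_count_of_A[:min_freq])
--             ret.append(sum_f)
--             cache[min_freq] = sum_f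
--         else:
--             ret.append(cache[min_freq])
--
--     return ret
-- ===== SOURCE B (Python) =====
-- def better_compare_string(A, B):
--     def mf(w):
--         return w.count(min(w))
--     vals = sorted(mf(w) for w in A.split(","))
--     def count_less(x):
--         lo, hi = 0, len(vals)
--         while lo < hi:
--             mid = (lo + hi) // 2
--             if vals[mid] < x:
--                 lo = mid + 1
--             else:
--                 hi = mid
--         return lo
--     return [count_less(mf(w)) for w in B.split(",")]
-- ===== Notes on version B (the rewrite author's own statement) =====
-- stated objective: alternative
-- what changed: Drops A's fixed 11-bucket frequency table and memo cache of slice sums entirely: B sorts the list of min-char frequencies of A's words once and answers each B-word with a hand-written binary search (lower bound) over that sorted list, counting the elements strictly below its min-char frequency.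
import Mathlib
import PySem

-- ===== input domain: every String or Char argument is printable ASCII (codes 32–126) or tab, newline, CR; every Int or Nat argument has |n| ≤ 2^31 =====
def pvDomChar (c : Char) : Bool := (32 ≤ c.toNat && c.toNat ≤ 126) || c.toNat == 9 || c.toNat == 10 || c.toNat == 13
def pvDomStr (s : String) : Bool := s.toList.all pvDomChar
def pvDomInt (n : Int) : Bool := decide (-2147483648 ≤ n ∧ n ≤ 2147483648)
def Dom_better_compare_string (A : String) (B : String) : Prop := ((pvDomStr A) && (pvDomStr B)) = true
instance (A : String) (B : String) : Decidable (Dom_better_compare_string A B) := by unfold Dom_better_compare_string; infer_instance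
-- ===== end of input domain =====

-- B drops A's 11-bucket table and memo cache: it sorts the min-char frequencies of A's words once
-- and answers each B-word by a hand-written binary search (lower bound) over that sorted list.

-- ===== PORT A =====
-- shared primitive of both Pythons: `str.count(min(str))` on one word; min('') raises ValueError
-- (word = [], excluded by Pre_), modelled here by the unused 0 branch
def bcsMinFreq (w : List Char) : Nat :=
  match PySem.List.min? w (fun c => c) with
  | none => 0
  | some c => w.count c

-- A's first loop: `freq_count_of_A[min_freq] += 1` (IndexError for min_freq > 10 is excluded by
-- Pre_; List.set/getD are exact inside Pre_)
def bcsFreqTable (ws : List (List Char)) : List Int :=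
  ws.foldl (fun f w => f.set (bcsMinFreq w) (f.getD (bcsMinFreq w) 0 + 1)) (List.replicate 11 0)

def better_compare_string (A : String) (B : String) : List Int :=
  let As := PySem.Chars.splitOn A.toList [','];
  let Bs := PySem.Chars.splitOn B.toList [','];
  let freq := bcsFreqTable As;
  -- second loop: cache of sums, ret.append — `cache[min_freq]` (IndexError > 10 outside Pre_) via getD
  (Bs.foldl (fun (st : List Int × List Int) w =>
      let mf := bcsMinFreq w
      if st.1.getD mf 0 = 0 then
        let s := (PySem.List.slice freq none (some (mf : Int))).sum
        (st.1.set mf s, st.2 ++ [s])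
      else (st.1, st.2 ++ [st.1.getD mf 0]))
    (List.replicate 11 0, [])).2

-- ===== PORT B =====
-- Source B's while-loop `count_less`: lower-bound binary search over the sorted list
-- (`vals[mid]` via getD: mid < hi ≤ len throughout, so the default is never taken; the fuel
-- hi - lo only makes the loop structurally total — each iteration shrinks hi - lo by ≥ 1,
-- so the 0-fuel branch is never reached)
def bcsGoF (vals : List Int) (x : Int) : Nat → Nat → Nat → Nat
  | 0, lo, _ => lo
  | fuel + 1, lo, hi =>
    if lo < hi then
      let mid := (lo + hi) / 2
      if vals.getD mid 0 < x then bcsGoF vals x fuel (mid + 1) hi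
      else bcsGoF vals x fuel lo mid
    else lo

def bcsGo (vals : List Int) (x : Int) (lo hi : Nat) : Nat :=
  bcsGoF vals x (hi - lo) lo hi

def better_compare_string_alt (A : String) (B : String) : List Int :=
  -- vals = sorted(mf(w) for w in A.split(","))
  let vals := PySem.List.sorted
      ((PySem.Chars.splitOn A.toList [',']).map (fun w => (bcsMinFreq w : Int))) (fun v => v) false;
  -- [count_less(mf(w)) for w in B.split(",")]
  (PySem.Chars.splitOn B.toList [',']).map
    (fun w => ((bcsGo vals ((bcsMinFreq w : Int)) 0 vals.length : Nat) : Int))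

-- ===== PRECONDITION & SPEC =====
-- Pre_ = exactly the inputs where Python A returns: every comma-separated word (in A and B) is
-- nonempty (min('') raises ValueError) and its min-char count is ≤ 10 (index 11+ raises IndexError).
def Pre_better_compare_string (A : String) (B : String) : Prop :=
  (∀ w ∈ PySem.Chars.splitOn A.toList [','], w ≠ [] ∧ bcsMinFreq w ≤ 10) ∧
  (∀ w ∈ PySem.Chars.splitOn B.toList [','], w ≠ [] ∧ bcsMinFreq w ≤ 10)
instance (A : String) (B : String) : Decidable (Pre_better_compare_string A B) := by
  unfold Pre_better_compare_string; infer_instance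

def pvWitness_better_compare_string : String × String := ("a,bb,ab", "b,aa")

def Spec_better_compare_string (A : String) (B : String) (out : List Int) : Prop := out = better_compare_string_alt A B
instance (A : String) (B : String) (out : List Int) : Decidable (Spec_better_compare_string A B out) := by unfold Spec_better_compare_string; infer_instance

-- ===== CLAIM (what is proved, stated in full; the proofs are below) =====
def Claim_equal_better_compare_string : Prop := ∀ (A : String) (B : String), Dom_better_compare_string A B → Pre_better_compare_string A B → Spec_better_compare_string A B (better_compare_string A B)

-- ===== LEMMAS AND PROOFS =====

-- A's second loop appends sum(freq[:mf]) for every word, whatever the cache holds,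
-- as long as every nonzero cache entry already equals that sum
theorem bcsLoopA_eq_map (freq : List Int) (ws : List (List Char)) :
    ∀ (cache ret : List Int),
    (∀ j, cache.getD j 0 = 0 ∨ cache.getD j 0 = (freq.take j).sum) →
    (ws.foldl (fun (st : List Int × List Int) w =>
        let mf := bcsMinFreq w
        if st.1.getD mf 0 = 0 then
          let s := (PySem.List.slice freq none (some (mf : Int))).sum
          (st.1.set mf s, st.2 ++ [s])
        else (st.1, st.2 ++ [st.1.getD mf 0])) (cache, ret)).2
      = ret ++ ws.map (fun w => (freq.take (bcsMinFreq w)).sum) := by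
  induction ws with
  | nil => intro cache ret _; simp
  | cons w t ih =>
    intro cache ret hinv
    simp only [List.foldl_cons, List.map_cons]
    rw [PySem.List.slice_to_natCast]
    by_cases h0 : cache.getD (bcsMinFreq w) 0 = 0
    · simp only [h0, if_pos]
      rw [ih _ _ ?_]
      · simp
      · intro j
        rcases eq_or_ne j (bcsMinFreq w) with hj | hj
        · subst hj
          by_cases hlt : bcsMinFreq w < cache.length
          · right
            simp [List.getD_eq_getElem?_getD, List.getElem?_set_self hlt]
          · left
            simp [hlt]
        · rw [List.getD_eq_getElem?_getD, List.getElem?_set_ne (by omega),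
            ← List.getD_eq_getElem?_getD]
          exact hinv j
    · simp only [if_neg h0]
      rcases hinv (bcsMinFreq w) with h | h
      · exact absurd h h0
      · rw [ih _ _ hinv, h]
        simp

-- incrementing bucket m shifts sum(l[:k]) by 1 exactly when m < k
theorem sum_take_set : ∀ (l : List Int) (m k : Nat), m < l.length →
    ((l.set m (l.getD m 0 + 1)).take k).sum = (l.take k).sum + (if m < k then 1 else 0) := by
  intro l
  induction l with
  | nil => intro m k h; simp at h
  | cons a t ih =>
    intro m k h
    cases m with
    | zero =>
      cases k with
      | zero => simp
      | succ s => simp; ring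
    | succ n =>
      cases k with
      | zero => simp
      | succ s =>
        have := ih n s (by simpa using h)
        simp only [List.getD_cons_succ, List.set_cons_succ, List.take_succ_cons,
          List.sum_cons, this, Nat.succ_lt_succ_iff]
        ring

-- bucket pass, summed: sum(freq[:k]) counts the min-frequencies below k
theorem bucket_foldl (ws : List (List Char)) : ∀ (f : List Int), f.length = 11 →
    (∀ w ∈ ws, bcsMinFreq w ≤ 10) → ∀ k : Nat,
    ((ws.foldl (fun f w => f.set (bcsMinFreq w) (f.getD (bcsMinFreq w) 0 + 1)) f).take k).sum
      = (f.take k).sum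
        + ((ws.map (fun w => (bcsMinFreq w : Int))).countP (fun v => decide (v < (k : Int))) : Int) := by
  induction ws with
  | nil => intro f _ _ k; simp
  | cons w t ih =>
    intro f hf hall k
    simp only [List.foldl_cons, List.map_cons, List.countP_cons]
    rw [ih _ (by simp [hf]) (fun u hu => hall u (List.mem_cons_of_mem _ hu)) k,
      sum_take_set f (bcsMinFreq w) k
        (by rw [hf]; exact lt_of_le_of_lt (hall w (List.mem_cons_self)) (by norm_num))]
    have hd : (decide ((bcsMinFreq w : Int) < (k : Int))) = decide (bcsMinFreq w < k) := by
      simp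
    rw [hd]
    by_cases hmk : bcsMinFreq w < k
    · simp [hmk]; ring
    · simp [hmk]

theorem bucket_sum (ws : List (List Char)) (h : ∀ w ∈ ws, bcsMinFreq w ≤ 10) (k : Nat) :
    ((bcsFreqTable ws).take k).sum
      = ((ws.map (fun w => (bcsMinFreq w : Int))).countP (fun v => decide (v < (k : Int))) : Int) := by
  unfold bcsFreqTable
  rw [bucket_foldl ws (List.replicate 11 0) (by simp) h k]
  have hz : ((List.replicate 11 (0:Int)).take k).sum = 0 := by
    apply List.sum_eq_zero
    intro x hx
    have := List.take_subset k _ hx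
    simp at this
    exact this
  rw [hz, zero_add]

-- if elements satisfying p are exactly the first r positions, countP p = r
theorem countP_of_boundary (p : Int → Bool) : ∀ (l : List Int) (r : Nat), r ≤ l.length →
    (∀ i, i < r → p (l.getD i 0) = true) →
    (∀ i, r ≤ i → i < l.length → p (l.getD i 0) = false) →
    l.countP p = r := by
  intro l
  induction l with
  | nil => intro r hr _ _; simp at hr ⊢; omega
  | cons a t ih =>
    intro r hr hlt hge
    cases r with
    | zero =>
      rw [List.countP_eq_zero]
      intro x hx
      rw [List.mem_iff_getElem] at hx
      obtain ⟨i, hi, rfl⟩ := hx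
      have := hge i (Nat.zero_le _) hi
      rw [List.getD_eq_getElem _ _ hi] at this
      simp [this]
    | succ s =>
      have ha : p a = true := by simpa using hlt 0 (Nat.succ_pos s)
      have ht : t.countP p = s := by
        apply ih s (by simpa using hr)
        · intro i hi
          simpa using hlt (i + 1) (by omega)
        · intro i hi hil
          simpa using hge (i + 1) (by omega) (by simpa using hil)
      simp [ha, ht]

-- the binary search computes the number of elements < x in a nondecreasing list
theorem bcsGoF_eq (vals : List Int) (x : Int) (hp : vals.Pairwise (· ≤ ·)) :
    ∀ (n lo hi : Nat), hi - lo ≤ n → lo ≤ hi → hi ≤ vals.length →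
    (∀ i, i < lo → vals.getD i 0 < x) →
    (∀ i, hi ≤ i → i < vals.length → ¬ vals.getD i 0 < x) →
    bcsGoF vals x n lo hi = vals.countP (fun v => decide (v < x)) := by
  have hmono : ∀ i j, i ≤ j → j < vals.length → vals.getD i 0 ≤ vals.getD j 0 := by
    intro i j hij hj
    rcases eq_or_lt_of_le hij with rfl | hlt
    · exact le_refl _
    · rw [List.getD_eq_getElem _ _ (lt_trans hlt hj), List.getD_eq_getElem _ _ hj]
      exact List.pairwise_iff_getElem.mp hp i j (lt_trans hlt hj) hj hlt
  have base : ∀ (lo : Nat), lo ≤ vals.length →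
      (∀ i, i < lo → vals.getD i 0 < x) →
      (∀ i, lo ≤ i → i < vals.length → ¬ vals.getD i 0 < x) →
      lo = vals.countP (fun v => decide (v < x)) := by
    intro lo hle hlo hhi
    refine (countP_of_boundary _ vals lo hle ?_ ?_).symm
    · intro i hi; simpa using hlo i hi
    · intro i h1 h2; simpa using hhi i h1 h2
  intro n
  induction n with
  | zero =>
    intro lo hi hfuel hle hlen hlo hhi
    have : lo = hi := by omega
    subst this
    exact base lo hlen hlo hhi
  | succ n ih =>
    intro lo hi hfuel hle hlen hlo hhi
    by_cases h : lo < hi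
    · rw [bcsGoF]
      simp only [h, if_pos]
      have hmlo : lo ≤ (lo + hi) / 2 := (Nat.le_div_iff_mul_le (by norm_num)).mpr (by omega)
      have hmhi : (lo + hi) / 2 < hi := (Nat.div_lt_iff_lt_mul (by norm_num)).mpr (by omega)
      by_cases hv : vals.getD ((lo + hi) / 2) 0 < x
      · simp only [hv, if_pos]
        apply ih ((lo + hi) / 2 + 1) hi (by omega) (by omega) hlen ?_ hhi
        intro i hi'
        exact lt_of_le_of_lt (hmono i ((lo + hi) / 2) (by omega) (by omega)) hv
      · simp only [hv, if_neg, not_false_iff]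
        apply ih lo ((lo + hi) / 2) (by omega) (by omega) (by omega) hlo ?_
        intro i h1 h2 hcon
        exact hv (lt_of_le_of_lt (hmono ((lo + hi) / 2) i h1 h2) hcon)
    · have : lo = hi := by omega
      subst this
      rw [bcsGoF]
      simp only [lt_irrefl, if_neg, not_false_iff]
      exact base lo hlen hlo hhi

theorem bcsGo_eq (vals : List Int) (x : Int) (hp : vals.Pairwise (· ≤ ·)) :
    bcsGo vals x 0 vals.length = vals.countP (fun v => decide (v < x)) :=
  bcsGoF_eq vals x hp (vals.length - 0) 0 vals.length (le_refl _) (Nat.zero_le _) (le_refl _)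
    (by intro i hi; omega) (by intro i h1 h2; omega)

-- ===== VERDICT (by name: the statements are the Claim_ definitions above) =====
theorem better_compare_string_spec : Claim_equal_better_compare_string := by
  intro A B _ hpre
  unfold Spec_better_compare_string better_compare_string better_compare_string_alt
  set As := PySem.Chars.splitOn A.toList [','] with hAs
  set Bs := PySem.Chars.splitOn B.toList [','] with hBs
  set freq := bcsFreqTable As with hfreq
  set msA := As.map (fun w => (bcsMinFreq w : Int)) with hmsA
  set vals := PySem.List.sorted msA (fun v => v) false with hvals
  rw [bcsLoopA_eq_map freq Bs (List.replicate 11 0) []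
    (by intro j; left; rw [List.getD_eq_getElem?_getD, List.getElem?_replicate]; split <;> rfl)]
  rw [List.nil_append]
  apply List.map_congr_left
  intro w _
  rw [hfreq, bucket_sum As (fun u hu => (hpre.1 u hu).2) (bcsMinFreq w)]
  have hperm : vals.Perm msA := PySem.List.sorted_perm msA (fun v => v) false
  have hpw : vals.Pairwise (· ≤ ·) := PySem.List.sorted_pairwise msA (fun v => v)
  rw [bcsGo_eq vals ((bcsMinFreq w : Int)) hpw, hperm.countP_eq]
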